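-- pv_equiv track=rewrite | github.com/jjuliazhou/usaco | dec2023q3.py | get_hit_dict
-- ===== SOURCE A (Python) =====
-- def get_hit_dict(cmd, start_pos, targets):
--     assert isinstance(targets, set)
--     d = {}
--     pos = start_pos
--     for i in range(len(cmd)):
--         c = cmd[i]
--         if c == "L":
--             pos -= 1
--         elif c == "R":
--             pos += 1
--         else:
--             if pos in targets:
--                 d[pos] = d[pos] + 1 if pos in d else 1
--     return d
-- ===== SOURCE B (Python) =====
-- def get_hit_dict(cmd, start_pos, targets):
--     # pass 1: the position the robot occupies when each command is issued
--     positions = []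
--     p = start_pos
--     for c in cmd:
--         positions.append(p)
--         p += (c == "R") - (c == "L")
--     # pass 2: count the stay commands issued while sitting on a target
--     hits = {}
--     for c, p in zip(cmd, positions):
--         if c != "L" and c != "R" and p in targets:
--             hits[p] = hits.get(p, 0) + 1
--     return hits
-- ===== Notes on version B (the rewrite author's own statement) =====
-- stated objective: alternative
-- what changed: Replaces A's single fused loop (mutating position and dict together) with a two-pass decomposition: first build the stream of positions at which each command is issued, then count target hits by zipping commands with positions and filtering.
import Mathlib
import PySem

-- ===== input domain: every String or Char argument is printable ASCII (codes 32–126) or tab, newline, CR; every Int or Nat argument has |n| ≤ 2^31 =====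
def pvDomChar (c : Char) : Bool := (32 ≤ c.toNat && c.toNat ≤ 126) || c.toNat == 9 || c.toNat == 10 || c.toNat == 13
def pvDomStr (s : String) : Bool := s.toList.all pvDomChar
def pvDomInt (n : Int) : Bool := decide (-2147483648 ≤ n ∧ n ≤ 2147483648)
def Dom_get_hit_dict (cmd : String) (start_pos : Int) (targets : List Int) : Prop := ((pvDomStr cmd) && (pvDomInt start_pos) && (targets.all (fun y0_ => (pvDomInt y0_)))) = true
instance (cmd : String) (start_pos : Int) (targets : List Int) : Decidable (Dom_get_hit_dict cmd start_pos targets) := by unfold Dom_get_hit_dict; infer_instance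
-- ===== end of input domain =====

-- B replaces A's single fused loop with a two-pass decomposition (position stream, then filtered counting); same cost, different structure.

-- ===== PORT A =====
-- index loop `for i in range(len(cmd))`; cmd[i] is always in range, ported via pyGetD with an unreachable default
def get_hit_dict (cmd : String) (start_pos : Int) (targets : List Int) : List (Int × Int) :=
  let st := (PySem.List.pyRange 0 (PySem.Str.len cmd) 1).foldl
    (fun (st : PySem.Dict Int Int × Int) i =>
      let c := PySem.List.pyGetD cmd.toList i ' '
      if c = 'L' then (st.1, st.2 - 1)
      else if c = 'R' then (st.1, st.2 + 1)
      else if targets.contains st.2 then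
        (st.1.insert st.2 (if st.1.contains st.2 then st.1.getD st.2 0 + 1 else 1), st.2)
      else st) (PySem.Dict.empty, start_pos)
  st.1.items

-- ===== PORT B =====
def get_hit_dict_alt (cmd : String) (start_pos : Int) (targets : List Int) : List (Int × Int) :=
  -- pass 1: positions.append(p); p += (c == "R") - (c == "L")
  let st := cmd.toList.foldl
    (fun (st : List Int × Int) c =>
      (st.1 ++ [st.2], st.2 + ((if c = 'R' then 1 else 0) - (if c = 'L' then 1 else 0))))
    ([], start_pos)
  let positions := st.1
  -- pass 2: filtered counting over zip(cmd, positions)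
  let hits := (cmd.toList.zip positions).foldl
    (fun (d : PySem.Dict Int Int) cp =>
      if cp.1 ≠ 'L' ∧ cp.1 ≠ 'R' ∧ targets.contains cp.2 then
        d.insert cp.2 (d.getD cp.2 0 + 1)
      else d) PySem.Dict.empty
  hits.items

-- ===== PRECONDITION & SPEC =====
def Spec_get_hit_dict (cmd : String) (start_pos : Int) (targets : List Int) (out : List (Int × Int)) : Prop := out = get_hit_dict_alt cmd start_pos targets
instance (cmd : String) (start_pos : Int) (targets : List Int) (out : List (Int × Int)) : Decidable (Spec_get_hit_dict cmd start_pos targets out) := by unfold Spec_get_hit_dict; infer_instance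

-- ===== CLAIM (what is proved, stated in full; the proofs are below) =====
def Claim_equal_get_hit_dict : Prop := ∀ (cmd : String) (start_pos : Int) (targets : List Int), Dom_get_hit_dict cmd start_pos targets → Spec_get_hit_dict cmd start_pos targets (get_hit_dict cmd start_pos targets)

-- ===== LEMMAS AND PROOFS =====

-- the position stream, structurally
def pvPosList (cs : List Char) (p : Int) : List Int :=
  match cs with
  | [] => []
  | c :: cs => p :: pvPosList cs (p + ((if c = 'R' then 1 else 0) - (if c = 'L' then 1 else 0)))

theorem pvPositions_eq (cs : List Char) (acc : List Int) (p : Int) :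
    (cs.foldl (fun (st : List Int × Int) c =>
      (st.1 ++ [st.2], st.2 + ((if c = 'R' then 1 else 0) - (if c = 'L' then 1 else 0)))) (acc, p)).1
    = acc ++ pvPosList cs p := by
  induction cs generalizing acc p with
  | nil => simp [pvPosList]
  | cons c cs ih => simp [pvPosList, List.foldl_cons, ih]

theorem pvMain (targets : List Int) (cs : List Char) (d : PySem.Dict Int Int) (p : Int) :
    (cs.foldl
      (fun (st : PySem.Dict Int Int × Int) c =>
        if c = 'L' then (st.1, st.2 - 1)
        else if c = 'R' then (st.1, st.2 + 1)
        else if targets.contains st.2 then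
          (st.1.insert st.2 (if st.1.contains st.2 then st.1.getD st.2 0 + 1 else 1), st.2)
        else st) (d, p)).1
    = (cs.zip (pvPosList cs p)).foldl
      (fun (e : PySem.Dict Int Int) cp =>
        if cp.1 ≠ 'L' ∧ cp.1 ≠ 'R' ∧ targets.contains cp.2 then
          e.insert cp.2 (e.getD cp.2 0 + 1)
        else e) d := by
  induction cs generalizing d p with
  | nil => rfl
  | cons c cs ih =>
    simp only [pvPosList, List.zip_cons_cons, List.foldl_cons]
    by_cases hL : c = 'L'
    · simpa [hL, sub_eq_add_neg] using ih d (p - 1)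
    · by_cases hR : c = 'R'
      · simpa [hL, hR] using ih d (p + 1)
      · have hδ : ((if c = 'R' then (1:Int) else 0) - (if c = 'L' then 1 else 0)) = 0 := by
          rw [if_neg hR, if_neg hL]; ring
        rw [hδ, add_zero, if_neg hL, if_neg hR]
        by_cases ht : targets.contains p
        · rw [if_pos ht,
            if_pos (show c ≠ 'L' ∧ c ≠ 'R' ∧ targets.contains p = true from ⟨hL, hR, ht⟩), ih]
          congr 2
          by_cases hc : d.contains p
          · rw [if_pos hc]
          · rw [if_neg hc, PySem.Dict.getD_of_not_contains d 0 (by simpa using hc)]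
            norm_num
        · rw [if_neg ht, if_neg (fun h => ht h.2.2), ih]

-- ===== VERDICT (by name: the statement is the Claim_ definition above) =====
theorem get_hit_dict_spec : Claim_equal_get_hit_dict := by
  intro cmd start_pos targets _
  unfold Spec_get_hit_dict get_hit_dict get_hit_dict_alt
  simp only [PySem.Str.len_eq]
  rw [PySem.List.foldl_pyRange_zero_pyGetD' cmd.toList ' '
    (fun (st : PySem.Dict Int Int × Int) c =>
      if c = 'L' then (st.1, st.2 - 1)
      else if c = 'R' then (st.1, st.2 + 1)
      else if targets.contains st.2 then
        (st.1.insert st.2 (if st.1.contains st.2 then st.1.getD st.2 0 + 1 else 1), st.2)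
      else st) (PySem.Dict.empty, start_pos)]
  rw [pvPositions_eq cmd.toList [] start_pos, List.nil_append, pvMain]
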